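-- pv_equiv track=rewrite | github.com/yizhoupan3-debug/skill | skills/autoresearch/scripts/research_ctl.py | overall_novelty_assessment
-- ===== SOURCE A (Python) =====
-- from typing import Any
--
-- def overall_novelty_assessment(state: dict[str, Any]) -> str:
--     records = state.get("novelty_gate", {}).get("claim_records", [])
--     if not records:
--         return "insufficient"
--     verdicts = [record.get("verdict") for record in records]
--     if verdicts and all(verdict == "novel" for verdict in verdicts):
--         return "strong"
--     if any(verdict == "not-novel" for verdict in verdicts):
--         not_novel_count = sum(verdict == "not-novel" for verdict in verdicts)
--         return "weak" if not_novel_count >= 2 else "moderate"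
--     if any(verdict == "risky" for verdict in verdicts):
--         return "moderate"
--     return "strong" if any(verdict == "novel" for verdict in verdicts) else "moderate"
-- ===== SOURCE B (Python) =====
-- from typing import Any
--
-- def overall_novelty_assessment(state: dict[str, Any]) -> str:
--     records = state.get("novelty_gate", {}).get("claim_records", [])
--     if not records:
--         return "insufficient"
--     novel = not_novel = risky = 0
--     for record in records:
--         v = record.get("verdict")
--         if v == "novel":
--             novel += 1
--         elif v == "not-novel":
--             not_novel += 1
--         elif v == "risky":
--             risky += 1
--     if novel == len(records):
--         return "strong"
--     if not_novel >= 1: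
--         return "weak" if not_novel >= 2 else "moderate"
--     if risky >= 1:
--         return "moderate"
--     return "strong" if novel >= 1 else "moderate"
-- ===== Notes on version B (the rewrite author's own statement) =====
-- stated objective: alternative
-- what changed: Replaces A's repeated all/any/sum scans over the verdict list with a single tally pass building three counts, then classifies purely from the counts.
import Mathlib
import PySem

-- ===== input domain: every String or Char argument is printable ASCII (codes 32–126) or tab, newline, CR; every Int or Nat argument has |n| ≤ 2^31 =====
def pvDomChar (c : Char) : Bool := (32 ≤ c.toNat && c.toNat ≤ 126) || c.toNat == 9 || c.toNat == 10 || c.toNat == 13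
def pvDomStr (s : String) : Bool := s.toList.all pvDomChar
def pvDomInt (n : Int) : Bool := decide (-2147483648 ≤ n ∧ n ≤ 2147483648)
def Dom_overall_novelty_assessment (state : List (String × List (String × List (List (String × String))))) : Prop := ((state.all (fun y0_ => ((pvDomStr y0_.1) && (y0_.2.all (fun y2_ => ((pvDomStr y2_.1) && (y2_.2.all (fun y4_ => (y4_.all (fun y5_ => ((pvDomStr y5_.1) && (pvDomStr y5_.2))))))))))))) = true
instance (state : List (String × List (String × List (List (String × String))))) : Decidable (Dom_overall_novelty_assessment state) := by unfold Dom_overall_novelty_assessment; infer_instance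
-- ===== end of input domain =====

-- B replaces A's repeated all/any/sum scans over the verdicts with a single tally fold
-- (counts of novel / not-novel / risky) followed by a decision on the counts (objective: alternative).

def pvAssocGetD {α : Type} (d : List (String × α)) (k : String) (dflt : α) : α :=
  match d.find? (fun p => p.1 == k) with
  | some p => p.2
  | none => dflt

def pvAssocGet? {α : Type} (d : List (String × α)) (k : String) : Option α :=
  (d.find? (fun p => p.1 == k)).map (·.2)

-- ===== PORT A =====
def overall_novelty_assessment (state : List (String × List (String × List (List (String × String))))) : String :=
  let records := pvAssocGetD (pvAssocGetD state "novelty_gate" []) "claim_records" []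
  if records.isEmpty then "insufficient" else
  let verdicts := records.map (fun r => pvAssocGet? r "verdict")
  if !verdicts.isEmpty && verdicts.all (fun v => v == some "novel") then "strong"
  else if verdicts.any (fun v => v == some "not-novel") then
    let not_novel_count := verdicts.foldl (fun s v => s + (if v == some "not-novel" then (1:Int) else 0)) 0
    if not_novel_count ≥ 2 then "weak" else "moderate"
  else if verdicts.any (fun v => v == some "risky") then "moderate"
  else if verdicts.any (fun v => v == some "novel") then "strong" else "moderate"

-- ===== PORT B =====
def overall_novelty_assessment_alt (state : List (String × List (String × List (List (String × String))))) : String :=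
  let records := pvAssocGetD (pvAssocGetD state "novelty_gate" []) "claim_records" []
  if records.isEmpty then "insufficient" else
  let c := records.foldl (fun (acc : Int × Int × Int) r =>
    let v := pvAssocGet? r "verdict"
    if v == some "novel" then (acc.1 + 1, acc.2.1, acc.2.2)
    else if v == some "not-novel" then (acc.1, acc.2.1 + 1, acc.2.2)
    else if v == some "risky" then (acc.1, acc.2.1, acc.2.2 + 1)
    else acc) (0, 0, 0)
  if c.1 = (records.length : Int) then "strong"
  else if c.2.1 ≥ 1 then (if c.2.1 ≥ 2 then "weak" else "moderate")
  else if c.2.2 ≥ 1 then "moderate"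
  else if c.1 ≥ 1 then "strong" else "moderate"


-- ===== PRECONDITION & SPEC =====
def Spec_overall_novelty_assessment (state : List (String × List (String × List (List (String × String))))) (out : String) : Prop := out = overall_novelty_assessment_alt state
instance (state : List (String × List (String × List (List (String × String))))) (out : String) : Decidable (Spec_overall_novelty_assessment state out) := by unfold Spec_overall_novelty_assessment; infer_instance

-- ===== CLAIM (what is proved, stated in full; the proofs are below) =====
def Claim_equal_overall_novelty_assessment : Prop := ∀ (state : List (String × List (String × List (List (String × String))))), Dom_overall_novelty_assessment state → Spec_overall_novelty_assessment state (overall_novelty_assessment state)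

-- ===== LEMMAS AND PROOFS =====
-- count of records whose verdict equals t
def pvCnt (rs : List (List (String × String))) (t : String) : Nat :=
  rs.countP (fun r => pvAssocGet? r "verdict" == some t)

theorem pv_fold_tally (rs : List (List (String × String))) (a b c : Int) :
    rs.foldl (fun (acc : Int × Int × Int) r =>
      let v := pvAssocGet? r "verdict"
      if v == some "novel" then (acc.1 + 1, acc.2.1, acc.2.2)
      else if v == some "not-novel" then (acc.1, acc.2.1 + 1, acc.2.2)
      else if v == some "risky" then (acc.1, acc.2.1, acc.2.2 + 1)
      else acc) (a, b, c)
    = (a + pvCnt rs "novel", b + pvCnt rs "not-novel", c + pvCnt rs "risky") := by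
  induction rs generalizing a b c with
  | nil => simp [pvCnt]
  | cons r rs ih =>
    simp only [List.foldl_cons, pvCnt, List.countP_cons] at *
    by_cases h1 : pvAssocGet? r "verdict" = some "novel"
    · simp only [h1]
      rw [show ((let v : Option String := some "novel";
          if v == some "novel" then (a + 1, b, c)
          else if v == some "not-novel" then (a, b + 1, c)
          else if v == some "risky" then (a, b, c + 1)
          else (a, b, c)) : Int × Int × Int) = (a + 1, b, c) from by simp, ih]
      simp [Prod.ext_iff]; omega
    · by_cases h2 : pvAssocGet? r "verdict" = some "not-novel"
      · simp only [h2]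
        rw [show ((let v : Option String := some "not-novel";
            if v == some "novel" then (a + 1, b, c)
            else if v == some "not-novel" then (a, b + 1, c)
            else if v == some "risky" then (a, b, c + 1)
            else (a, b, c)) : Int × Int × Int) = (a, b + 1, c) from by simp, ih]
        simp [Prod.ext_iff, h1]; omega
      · by_cases h3 : pvAssocGet? r "verdict" = some "risky"
        · simp only [h3]
          rw [show ((let v : Option String := some "risky";
              if v == some "novel" then (a + 1, b, c)
              else if v == some "not-novel" then (a, b + 1, c)
              else if v == some "risky" then (a, b, c + 1)
              else (a, b, c)) : Int × Int × Int) = (a, b, c + 1) from by simp, ih]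
          simp [Prod.ext_iff, h1, h2]; omega
        · rw [show ((let v := pvAssocGet? r "verdict";
              if v == some "novel" then (a + 1, b, c)
              else if v == some "not-novel" then (a, b + 1, c)
              else if v == some "risky" then (a, b, c + 1)
              else (a, b, c)) : Int × Int × Int) = (a, b, c) from by simp [h1, h2, h3], ih]
          simp [h1, h2, h3]

theorem pv_sum_indicator (vs : List (Option String)) (a : Int) :
    vs.foldl (fun s v => s + (if v == some "not-novel" then (1:Int) else 0)) a
    = a + vs.countP (fun v => v == some "not-novel") := by
  induction vs generalizing a with
  | nil => simp
  | cons v vs ih =>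
    simp only [List.foldl_cons, List.countP_cons, ih]
    by_cases h : (v == some "not-novel") = true <;> simp [h] <;> omega

theorem pv_all_cnt (rs : List (List (String × String))) :
    ((rs.map (fun r => pvAssocGet? r "verdict")).all (fun v => v == some "novel"))
    = decide (pvCnt rs "novel" = rs.length) := by
  rw [List.all_map]
  by_cases h : pvCnt rs "novel" = rs.length
  · simp only [h, decide_true]
    exact List.all_eq_true.2 (List.countP_eq_length.1 h)
  · simp only [h, decide_false]
    have h2 : ¬ ∀ x ∈ rs, (pvAssocGet? x "verdict" == some "novel") = true :=
      fun hall => h (List.countP_eq_length.2 hall)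
    rcases not_forall.1 h2 with ⟨x, hx⟩
    rcases Classical.not_imp.1 hx with ⟨hmem, hpx⟩
    exact List.all_eq_false.2 ⟨x, hmem, by simpa using hpx⟩

theorem pv_any_cnt (rs : List (List (String × String))) (t : String) :
    ((rs.map (fun r => pvAssocGet? r "verdict")).any (fun v => v == some t))
    = decide (0 < pvCnt rs t) := by
  rw [List.any_map]
  by_cases h : 0 < pvCnt rs t
  · rcases List.countP_pos_iff.1 h with ⟨x, hx, hpx⟩
    simp only [h, decide_true]
    exact List.any_eq_true.2 ⟨x, hx, hpx⟩
  · simp only [h, decide_false]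
    refine List.any_eq_false.2 (fun x hx => ?_)
    intro hpx
    exact h (List.countP_pos_iff.2 ⟨x, hx, hpx⟩)

theorem pv_cnt_map (rs : List (List (String × String))) (t : String) :
    (rs.map (fun r => pvAssocGet? r "verdict")).countP (fun v => v == some t) = pvCnt rs t := by
  rw [List.countP_map]; rfl

theorem overall_eq (state : List (String × List (String × List (List (String × String))))) :
    overall_novelty_assessment state = overall_novelty_assessment_alt state := by
  unfold overall_novelty_assessment overall_novelty_assessment_alt
  set rs := pvAssocGetD (pvAssocGetD state "novelty_gate" []) "claim_records" [] with hrs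
  by_cases hemp : rs.isEmpty
  · simp [hemp]
  · rw [if_neg hemp, if_neg hemp]
    have hne : (rs.map (fun r => pvAssocGet? r "verdict")).isEmpty = false := by
      simp [List.isEmpty_iff] at hemp ⊢; exact hemp
    simp only [pv_fold_tally, pv_sum_indicator, pv_all_cnt, pv_any_cnt, pv_cnt_map,
      hne, Bool.not_false, Bool.true_and, zero_add]
    have h1 : pvCnt rs "novel" ≤ rs.length := List.countP_le_length
    split_ifs <;> first | rfl | omega | (exfalso; simp only [decide_eq_true_eq] at *; omega)

-- ===== VERDICT (by name: the statement is the Claim_ definition above) =====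
theorem overall_novelty_assessment_spec : Claim_equal_overall_novelty_assessment := by
  intro state _
  unfold Spec_overall_novelty_assessment
  exact overall_eq state
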